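-- pv_equiv track=rewrite | github.com/qniman/YAP4 | PR20/main.py | col_maxima
-- ===== SOURCE A (Python) =====
-- def col_maxima(matrix: list[list[int]]) -> list[int]:
--     if not matrix:
--         return []
--     n_rows, n_cols = len(matrix), len(matrix[0])
--     maxima = []
--     for c in range(n_cols):
--         m = matrix[0][c]
--         for r in range(1, n_rows):
--             if matrix[r][c] > m:
--                 m = matrix[r][c]
--         maxima.append(m)
--     return maxima
-- ===== SOURCE B (Python) =====
-- def col_maxima(matrix: list[list[int]]) -> list[int]:
--     if not matrix:
--         return []
--     maxima = list(matrix[0])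
--     n_cols = len(matrix[0])
--     for r in range(1, len(matrix)):
--         row = matrix[r]
--         for c in range(n_cols):
--             if row[c] > maxima[c]:
--                 maxima[c] = row[c]
--     return maxima
-- ===== Notes on version B (the rewrite author's own statement) =====
-- stated objective: alternative
-- what changed: B maintains a running vector of column maxima updated row by row in row-major order, instead of A's column-outer rescan that finishes each column before starting the next.
import Mathlib
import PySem

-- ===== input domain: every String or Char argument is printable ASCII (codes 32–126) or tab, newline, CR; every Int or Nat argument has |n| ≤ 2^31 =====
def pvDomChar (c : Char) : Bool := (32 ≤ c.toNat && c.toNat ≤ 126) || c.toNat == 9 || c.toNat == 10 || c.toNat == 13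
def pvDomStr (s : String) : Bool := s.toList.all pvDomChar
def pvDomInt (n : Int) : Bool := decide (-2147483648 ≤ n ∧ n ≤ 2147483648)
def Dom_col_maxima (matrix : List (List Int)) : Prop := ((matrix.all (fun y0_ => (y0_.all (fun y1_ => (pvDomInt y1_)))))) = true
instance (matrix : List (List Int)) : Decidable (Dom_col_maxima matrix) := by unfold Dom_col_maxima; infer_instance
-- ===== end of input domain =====

-- B keeps a running vector of column maxima updated row by row (row-major), instead of
-- A's column-outer rescan; objective: alternative decomposition, same cost.

-- ===== PORT A =====
def col_maxima (matrix : List (List Int)) : List Int :=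
  if matrix = [] then []
  else
    let nRows : Int := matrix.length
    let nCols : Int := (PySem.List.pyGetD matrix 0 []).length
    (PySem.List.pyRange 0 nCols 1).foldl (fun maxima c =>
      let m := (PySem.List.pyRange 1 nRows 1).foldl (fun m r =>
        let v := PySem.List.pyGetD (PySem.List.pyGetD matrix r []) c 0
        if v > m then v else m)
        (PySem.List.pyGetD (PySem.List.pyGetD matrix 0 []) c 0)
      maxima ++ [m]) []

-- ===== PORT B =====
def col_maxima_alt (matrix : List (List Int)) : List Int :=
  if matrix = [] then []
  else
    let maxima0 := PySem.List.pyGetD matrix 0 []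
    let nCols : Int := maxima0.length
    (PySem.List.pyRange 1 (matrix.length : Int) 1).foldl (fun maxima row' =>
      let row := PySem.List.pyGetD matrix row' []
      (PySem.List.pyRange 0 nCols 1).foldl (fun maxima c =>
        let v := PySem.List.pyGetD row c 0
        if v > PySem.List.pyGetD maxima c 0 then PySem.List.pySetD maxima c v else maxima)
        maxima) maxima0

-- ===== PRECONDITION & SPEC =====
-- Pre_ excludes exactly the jagged matrices with a row shorter than the first row,
-- on which the Python A (and B) raise IndexError.
def Pre_col_maxima (matrix : List (List Int)) : Prop :=
  ∀ row ∈ matrix, (matrix.headD []).length ≤ row.length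
instance (matrix : List (List Int)) : Decidable (Pre_col_maxima matrix) := by
  unfold Pre_col_maxima; infer_instance
def pvWitness_col_maxima : List (List Int) := [[1, 5, 3], [4, 2, 6]]
def Spec_col_maxima (matrix : List (List Int)) (out : List Int) : Prop := out = col_maxima_alt matrix
instance (matrix : List (List Int)) (out : List Int) : Decidable (Spec_col_maxima matrix out) := by unfold Spec_col_maxima; infer_instance

-- ===== CLAIM (what is proved, stated in full; the proofs are below) =====
def Claim_equal_col_maxima : Prop := ∀ (matrix : List (List Int)), Dom_col_maxima matrix → Pre_col_maxima matrix → Spec_col_maxima matrix (col_maxima matrix)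

-- ===== LEMMAS AND PROOFS =====

-- one column-max update step (shared characterisation of both inner bodies)
def pvStep (k : Nat) (m : Int) (row : List Int) : Int :=
  if row.getD k 0 > m then row.getD k 0 else m

-- B's inner loop over the columns of one row, on Nat indices
def pvRowUpd (row : List Int) (n : Nat) (mx : List Int) : List Int :=
  (List.range n).foldl (fun mx k =>
    if row.getD k 0 > mx.getD k 0 then mx.set k (row.getD k 0) else mx) mx

theorem pvRowUpd_length (row : List Int) (n : Nat) (mx : List Int) :
    (pvRowUpd row n mx).length = mx.length := by
  unfold pvRowUpd
  induction n with
  | zero => simp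
  | succ n ih =>
    rw [List.range_succ, List.foldl_append]
    simp only [List.foldl_cons, List.foldl_nil]
    split
    · rw [List.length_set]; exact ih
    · exact ih

theorem pv_getD_set_ne (l : List Int) (i j : Nat) (v : Int) (h : j ≠ i) :
    (l.set i v).getD j 0 = l.getD j 0 := by
  rw [List.getD_eq_getElem?_getD, List.getD_eq_getElem?_getD, List.getElem?_set,
    if_neg (by omega : ¬ i = j)]

theorem pvRowUpd_getD (row : List Int) (n : Nat) (mx : List Int) (hn : n ≤ mx.length)
    (j : Nat) :
    (pvRowUpd row n mx).getD j 0 = if j < n then pvStep j (mx.getD j 0) row else mx.getD j 0 := by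
  unfold pvRowUpd
  induction n with
  | zero => simp
  | succ n ih =>
    rw [List.range_succ, List.foldl_append]
    simp only [List.foldl_cons, List.foldl_nil]
    have hlen : ((List.range n).foldl (fun mx k =>
        if row.getD k 0 > mx.getD k 0 then mx.set k (row.getD k 0) else mx) mx).length
        = mx.length := pvRowUpd_length row n mx
    have ih' := ih (by omega)
    by_cases hj : j < n
    · split
      · rw [pv_getD_set_ne _ _ _ _ (by omega : j ≠ n), ih']
        simp [hj, Nat.lt_succ_of_lt hj]
      · rw [ih']; simp [hj, Nat.lt_succ_of_lt hj]
    · by_cases hjn : j = n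
      · subst hjn
        have hprev : ((List.range j).foldl (fun mx k =>
            if row.getD k 0 > mx.getD k 0 then mx.set k (row.getD k 0) else mx) mx).getD j 0
            = mx.getD j 0 := by rw [ih']; simp
        rw [hprev, if_pos (Nat.lt_succ_self j)]
        by_cases hgt : row.getD j 0 > mx.getD j 0
        · rw [if_pos hgt, List.getD_eq_getElem?_getD,
            List.getElem?_set_self (by omega), Option.getD_some]
          simp only [pvStep]
          rw [if_pos hgt]
        · rw [if_neg hgt, hprev]
          simp only [pvStep]
          rw [if_neg hgt]
      · have hjs : ¬ j < n + 1 := by omega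
        split
        · rw [pv_getD_set_ne _ _ _ _ (by omega : j ≠ n), ih']; simp [hj]
        · rw [ih']; simp [hj]

-- A on a nonempty matrix: the map of per-column folds
theorem colA_char (h : List Int) (t : List (List Int)) :
    col_maxima (h :: t) =
      (List.range h.length).map (fun k =>
        t.foldl (fun m row => pvStep k m row) (h.getD k 0)) := by
  unfold col_maxima
  simp only [if_neg (List.cons_ne_nil h t)]
  rw [PySem.List.pyGetD_zero_cons]
  rw [PySem.List.foldl_append_singleton_eq_map]
  rw [PySem.List.pyRange_zero_nat]
  rw [List.map_map]
  apply List.map_congr_left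
  intro k _
  simp only [Function.comp]
  rw [PySem.List.foldl_pyRange_pyGetD' (h :: t) []
      (fun m row => if PySem.List.pyGetD row (↑k) 0 > m then PySem.List.pyGetD row (↑k) 0 else m)
      _ one_pos.le]
  simp only [Int.toNat_one, List.drop_one, List.tail_cons]
  congr 1
  · funext m row
    simp [pvStep, PySem.List.pyGetD_natCast]
  · simp

-- B on a nonempty matrix: a fold over the remaining rows of the row-update step
theorem colB_char (h : List Int) (t : List (List Int)) :
    col_maxima_alt (h :: t) = t.foldl (fun mx row => pvRowUpd row h.length mx) h := by
  unfold col_maxima_alt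
  simp only [if_neg (List.cons_ne_nil h t)]
  rw [PySem.List.pyGetD_zero_cons]
  rw [PySem.List.foldl_pyRange_pyGetD' (h :: t) []
      (fun maxima row => (PySem.List.pyRange 0 (↑h.length) 1).foldl (fun maxima c =>
        if PySem.List.pyGetD row c 0 > PySem.List.pyGetD maxima c 0
        then PySem.List.pySetD maxima c (PySem.List.pyGetD row c 0) else maxima) maxima)
      _ one_pos.le]
  simp only [Int.toNat_one, List.drop_one, List.tail_cons]
  congr 1
  funext mx row
  unfold pvRowUpd
  rw [PySem.List.pyRange_zero_nat, List.foldl_map]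
  apply PySem.List.foldl_congr_mem
  intro mx' k _
  simp [PySem.List.pyGetD_natCast, PySem.List.pySetD_natCast]

-- the core invariant: folding row updates equals the per-column folds, pointwise
theorem pv_main (n : Nat) (t : List (List Int)) :
    ∀ mx : List Int, mx.length = n →
      t.foldl (fun mx row => pvRowUpd row n mx) mx =
        (List.range n).map (fun k => t.foldl (fun m row => pvStep k m row) (mx.getD k 0)) := by
  induction t with
  | nil =>
    intro mx hmx
    simp only [List.foldl_nil]
    apply List.ext_getElem (by simp [hmx])
    intro i h1 h2
    simp [List.getD_eq_getElem?_getD, List.getElem?_eq_getElem h1]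
  | cons r t ih =>
    intro mx hmx
    simp only [List.foldl_cons]
    rw [ih (pvRowUpd r n mx) (by rw [pvRowUpd_length, hmx])]
    apply List.map_congr_left
    intro k hk
    rw [pvRowUpd_getD r n mx (by omega)]
    simp [List.mem_range.mp hk]

-- ===== VERDICT (by name: the statement is the Claim_ definition above) =====
theorem col_maxima_spec : Claim_equal_col_maxima := by
  intro matrix _ _
  unfold Spec_col_maxima
  cases matrix with
  | nil => rfl
  | cons h t =>
    rw [colA_char, colB_char, pv_main h.length t h rfl]
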